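-- pv_equiv track=rewrite | github.com/Yuuko-kurisu/IEEE_TII_PCCA_Github | BCSA_01_Hypothesis_Generator.py | _find_precise_column_match
-- ===== SOURCE A (Python) =====
-- from typing import Dict, List, Tuple, Any, Optional, Protocol, Union
--
-- def _find_precise_column_match(node_id: str, node_text: str, available_columns: List[str]) -> Optional[str]:
--     """
--     精确匹配节点到数据列的辅助函数。
--     """
--     node_text_lower = node_text.lower()
--
--     if node_text in available_columns:
--         return node_text
--
--     for col in available_columns:
--         if col.startswith('sensor_') and '_' in col:
--             parts = col.split('_', 2)
--             if len(parts) >= 3: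
--                 clean_col_name = parts[2].lower()
--                 if clean_col_name == node_text_lower:
--                     return col
--
--     for col in available_columns:
--         col_lower = col.lower()
--         if node_text_lower in col_lower or col_lower in node_text_lower:
--             return col
--
--     return None
-- ===== SOURCE B (Python) =====
-- from typing import List, Optional
--
-- def _find_precise_column_match(node_id: str, node_text: str, available_columns: List[str]) -> Optional[str]:
--     node_text_lower = node_text.lower()
--
--     def is_sensor(col):
--         if col.startswith('sensor_') and '_' in col:
--             parts = col.split('_', 2)
--             return len(parts) >= 3 and parts[2].lower() == node_text_lower
--         return False
--
--     def is_substring(col):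
--         col_lower = col.lower()
--         return node_text_lower in col_lower or col_lower in node_text_lower
--
--     first_sensor = None
--     first_substring = None
--     for col in available_columns:
--         if col == node_text:
--             return col
--         if first_sensor is None and is_sensor(col):
--             first_sensor = col
--         if first_substring is None and is_substring(col):
--             first_substring = col
--     return first_sensor if first_sensor is not None else first_substring
-- ===== Notes on version B (the rewrite author's own statement) =====
-- stated objective: alternative
-- what changed: Replaces A's membership test plus two sequential scans over available_columns with a single pass that returns an exact match immediately and records the first sensor-pattern and first substring match in accumulators, resolved by priority after the loop.
import Mathlib
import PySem

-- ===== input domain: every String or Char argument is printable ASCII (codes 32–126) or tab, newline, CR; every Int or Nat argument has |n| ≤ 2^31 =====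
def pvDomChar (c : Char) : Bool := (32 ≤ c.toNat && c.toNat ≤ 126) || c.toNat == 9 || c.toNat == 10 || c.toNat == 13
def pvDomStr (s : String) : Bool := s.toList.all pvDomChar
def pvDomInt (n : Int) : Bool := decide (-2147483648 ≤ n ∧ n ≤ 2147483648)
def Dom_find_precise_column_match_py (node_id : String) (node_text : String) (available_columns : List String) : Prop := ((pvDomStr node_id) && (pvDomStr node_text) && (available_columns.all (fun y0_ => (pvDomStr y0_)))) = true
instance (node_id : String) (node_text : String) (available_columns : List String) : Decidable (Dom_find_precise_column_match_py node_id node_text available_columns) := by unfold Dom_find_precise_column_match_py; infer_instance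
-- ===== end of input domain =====

-- B makes one pass over available_columns (exact match returns at once; first sensor / first
-- substring hit kept in accumulators, resolved by priority after the loop) instead of A's
-- membership test plus two sequential scans; same cost, different decomposition.

-- ===== PORT A =====
-- the sensor-column condition of A's first loop (nested ifs of the Python, as one Bool)
def pvSensorHit (ntl : String) (col : String) : Bool :=
  if PySem.Str.startswith col "sensor_" && PySem.Str.isIn "_" col then
    -- col.split('_', 2): sep "_" is nonempty, so splitMax? never returns none here
    let parts := (PySem.Str.splitMax? col "_" 2).getD []
    if parts.length ≥ 3 then
      -- parts[2] is safe: length ≥ 3 was just checked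
      PySem.Str.lower (PySem.List.pyGetD parts 2 "") == ntl
    else false
  else false

-- the two-way substring condition of A's second loop
def pvSubHit (ntl : String) (col : String) : Bool :=
  let cl := PySem.Str.lower col
  PySem.Str.isIn ntl cl || PySem.Str.isIn cl ntl

-- A's first loop: return the first sensor-pattern column
def pvALoop1 (ntl : String) : List String → Option String
  | [] => none
  | col :: rest => if pvSensorHit ntl col then some col else pvALoop1 ntl rest

-- A's second loop: return the first two-way-substring column
def pvALoop2 (ntl : String) : List String → Option String
  | [] => none
  | col :: rest => if pvSubHit ntl col then some col else pvALoop2 ntl rest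

def find_precise_column_match_py (node_id : String) (node_text : String) (available_columns : List String) : Option String :=
  let ntl := PySem.Str.lower node_text
  if available_columns.contains node_text then some node_text
  else
    match pvALoop1 ntl available_columns with
    | some col => some col
    | none => pvALoop2 ntl available_columns

-- ===== PORT B =====
-- B's single pass with the two accumulators (first_sensor, first_substring)
def pvBLoop (node_text ntl : String) : List String → Option String → Option String → Option String
  | [], fs, fb => match fs with | some c => some c | none => fb
  | col :: rest, fs, fb =>
    if col = node_text then some col
    else
      pvBLoop node_text ntl rest
        (if fs.isNone && pvSensorHit ntl col then some col else fs)
        (if fb.isNone && pvSubHit ntl col then some col else fb)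

def find_precise_column_match_py_alt (node_id : String) (node_text : String) (available_columns : List String) : Option String :=
  let ntl := PySem.Str.lower node_text
  pvBLoop node_text ntl available_columns none none

-- ===== PRECONDITION & SPEC =====
def Spec_find_precise_column_match_py (node_id : String) (node_text : String) (available_columns : List String) (out : Option String) : Prop := out = find_precise_column_match_py_alt node_id node_text available_columns
instance (node_id : String) (node_text : String) (available_columns : List String) (out : Option String) : Decidable (Spec_find_precise_column_match_py node_id node_text available_columns out) := by unfold Spec_find_precise_column_match_py; infer_instance

-- ===== CLAIM (what is proved, stated in full; the proofs are below) =====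
def Claim_equal_find_precise_column_match_py : Prop := ∀ (node_id : String) (node_text : String) (available_columns : List String), Dom_find_precise_column_match_py node_id node_text available_columns → Spec_find_precise_column_match_py node_id node_text available_columns (find_precise_column_match_py node_id node_text available_columns)

-- ===== LEMMAS AND PROOFS =====

-- if node_text occurs in the list, B's pass returns it (at its first occurrence), whatever the accumulators hold
theorem pvBLoop_of_mem (nt ntl : String) (cols : List String) (h : nt ∈ cols) :
    ∀ fs fb, pvBLoop nt ntl cols fs fb = some nt := by
  induction cols with
  | nil => cases h
  | cons col rest ih =>
    intro fs fb
    by_cases hc : col = nt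
    · simp [pvBLoop, hc]
    · rcases List.mem_cons.mp h with h | h
      · exact absurd h.symm hc
      · simp [pvBLoop, hc, ih h]

-- if node_text does not occur, B's pass resolves to accumulator-or-first-hit of each tier, sensor tier first
theorem pvBLoop_of_not_mem (nt ntl : String) (cols : List String) (h : nt ∉ cols) :
    ∀ fs fb, pvBLoop nt ntl cols fs fb =
      Option.or (Option.or fs (pvALoop1 ntl cols)) (Option.or fb (pvALoop2 ntl cols)) := by
  induction cols with
  | nil =>
    intro fs fb
    cases fs <;> cases fb <;> simp [pvBLoop, pvALoop1, pvALoop2, Option.or]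
  | cons col rest ih =>
    intro fs fb
    have hne : ¬ col = nt := fun e => h (e ▸ List.mem_cons_self)
    have hrest : nt ∉ rest := fun m => h (List.mem_cons_of_mem _ m)
    simp only [pvBLoop, hne, if_false, ih hrest]
    cases fs <;> cases fb <;>
      simp [pvALoop1, pvALoop2, Option.or] <;>
      by_cases h1 : pvSensorHit ntl col <;>
      by_cases h2 : pvSubHit ntl col <;>
      simp [h1, h2]

-- ===== VERDICT (by name: the statement is the Claim_ definition above) =====
theorem find_precise_column_match_py_spec : Claim_equal_find_precise_column_match_py := by
  intro node_id node_text cols _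
  unfold Spec_find_precise_column_match_py find_precise_column_match_py find_precise_column_match_py_alt
  by_cases hm : node_text ∈ cols
  · simp [hm, pvBLoop_of_mem node_text _ cols hm]
  · have hc : cols.contains node_text = false := by simpa using hm
    simp only [hc, Bool.false_eq_true, if_false,
      pvBLoop_of_not_mem node_text _ cols hm]
    cases pvALoop1 (PySem.Str.lower node_text) cols <;>
      cases pvALoop2 (PySem.Str.lower node_text) cols <;> simp [Option.or]
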